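-- pv_equiv track=rewrite | github.com/danhab05/InformatiquePrepa | Mpsi/TD1/ex4.py | plusFrequentK
-- ===== SOURCE A (Python) =====
-- def plusFrequentK(d):
--     dicMots = {}
--     for k in range(1, 29):
--         higherRank = 0
--         motPlusUtilise = ""
--         for mots in d.keys():
--             if len(mots) == k:
--                 if d[mots] > higherRank:
--                     higherRank = d[mots]
--                     motPlusUtilise = mots
--         if higherRank != 0:
--             dicMots[motPlusUtilise] = higherRank
--
--     return dicMots
-- ===== SOURCE B (Python) =====
-- def plusFrequentK(d):
--     # One pass: best (word, count) per length 1..28, first-seen wins ties; then emit by ascending length.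
--     best = {}
--     for w, c in d.items():
--         L = len(w)
--         if 1 <= L <= 28 and c > best.get(L, ("", 0))[1]:
--             best[L] = (w, c)
--     res = {}
--     for L in range(1, 29):
--         if L in best:
--             w, c = best[L]
--             res[w] = c
--     return res
-- ===== Notes on version B (the rewrite author's own statement) =====
-- stated objective: faster
-- what changed: Replaces A's 28 full scans of the dict (one per length) by a single pass that keeps the best (word,count) per length in a dict, then emits lengths 1..28 in order.
import Mathlib
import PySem

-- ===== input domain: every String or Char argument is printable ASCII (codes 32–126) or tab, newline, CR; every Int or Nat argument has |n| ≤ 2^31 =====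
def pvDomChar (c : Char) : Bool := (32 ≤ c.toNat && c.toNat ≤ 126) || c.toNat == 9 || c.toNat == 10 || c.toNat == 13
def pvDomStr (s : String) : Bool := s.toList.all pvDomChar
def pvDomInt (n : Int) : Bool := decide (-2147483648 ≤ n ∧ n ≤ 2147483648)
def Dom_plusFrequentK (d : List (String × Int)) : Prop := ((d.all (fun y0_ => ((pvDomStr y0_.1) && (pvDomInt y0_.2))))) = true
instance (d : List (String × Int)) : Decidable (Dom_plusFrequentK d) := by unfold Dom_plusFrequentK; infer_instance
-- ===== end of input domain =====

-- B replaces A's 28 full scans of the dict (one scan per word length) by a single pass keeping the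
-- best (word, count) per length in a dict, then emits lengths 1..28 in ascending order (objective: faster).


-- ===== PORT A =====
-- Literal port of A: for k in range(1, 29): scan d.keys(), track (higherRank, motPlusUtilise),
-- insert when higherRank != 0.  d[mots] is ported as (get? …).getD 0: the key 'mots' comes from
-- d.keys(), so the lookup always succeeds and KeyError is impossible.
def plusFrequentK (d : List (String × Int)) : List (String × Int) :=
  ((PySem.List.pyRange 1 29 1).foldl
    (fun (dicMots : PySem.Dict String Int) k =>
      let st := ((PySem.Dict.mk d).keys).foldl
        (fun (st : Int × String) mots =>
          if PySem.Str.len mots = k then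
            if ((PySem.Dict.mk d).get? mots).getD 0 > st.1 then
              (((PySem.Dict.mk d).get? mots).getD 0, mots)
            else st
          else st)
        ((0 : Int), "")
      if st.1 ≠ 0 then dicMots.insert st.2 st.1 else dicMots)
    PySem.Dict.empty).items

-- ===== PORT B =====
-- Port of B (Source B): one pass over d.items() keeping best[L] = (word, count); then emit L = 1..28.
def plusFrequentK_alt (d : List (String × Int)) : List (String × Int) :=
  let best : PySem.Dict Int (String × Int) :=
    d.foldl
      (fun (best : PySem.Dict Int (String × Int)) wc =>
        let L := PySem.Str.len wc.1
        if 1 ≤ L ∧ L ≤ 28 ∧ wc.2 > (best.getD L ("", 0)).2 then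
          best.insert L (wc.1, wc.2)
        else best)
      PySem.Dict.empty
  ((PySem.List.pyRange 1 29 1).foldl
    (fun (res : PySem.Dict String Int) L =>
      match best.get? L with
      | some wc => res.insert wc.1 wc.2
      | none => res)
    PySem.Dict.empty).items

-- ===== PRECONDITION & SPEC =====
-- The argument is a Python dict, whose keys are necessarily distinct; an association list with a
-- duplicated key does not represent any dict, so those lists are outside Pre_.
def Pre_plusFrequentK (d : List (String × Int)) : Prop := (d.map Prod.fst).Nodup
instance (d : List (String × Int)) : Decidable (Pre_plusFrequentK d) := by unfold Pre_plusFrequentK; infer_instance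
def pvWitness_plusFrequentK : (List (String × Int)) := [("a", 2), ("bb", 1), ("c", -1)]

def Spec_plusFrequentK (d : List (String × Int)) (out : List (String × Int)) : Prop := out = plusFrequentK_alt d
instance (d : List (String × Int)) (out : List (String × Int)) : Decidable (Spec_plusFrequentK d out) := by unfold Spec_plusFrequentK; infer_instance

-- ===== CLAIM (what is proved, stated in full; the proofs are below) =====
def Claim_equal_plusFrequentK : Prop := ∀ (d : List (String × Int)), Dom_plusFrequentK d → Pre_plusFrequentK d → Spec_plusFrequentK d (plusFrequentK d)

-- ===== LEMMAS AND PROOFS =====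

-- A's inner loop body for a fixed length k, after the dict lookup d[mots] has been replaced by the
-- paired value (valid under Pre_).
def pvStepA (k : Int) (st : Int × String) (wc : String × Int) : Int × String :=
  if PySem.Str.len wc.1 = k then (if wc.2 > st.1 then (wc.2, wc.1) else st) else st

-- B's one-pass loop body.
def pvStepB (best : PySem.Dict Int (String × Int)) (wc : String × Int) : PySem.Dict Int (String × Int) :=
  if 1 ≤ PySem.Str.len wc.1 ∧ PySem.Str.len wc.1 ≤ 28 ∧ wc.2 > (best.getD (PySem.Str.len wc.1) ("", 0)).2 then
    best.insert (PySem.Str.len wc.1) (wc.1, wc.2)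
  else best

-- Under Pre_, A's raw inner loop (lookup in the dict) is the pure fold pvStepA over the pairs.
theorem pvInnerA_eq (d : List (String × Int)) (hnd : Pre_plusFrequentK d) (k : Int) :
    ((PySem.Dict.mk d).keys).foldl
      (fun (st : Int × String) mots =>
        if PySem.Str.len mots = k then
          if ((PySem.Dict.mk d).get? mots).getD 0 > st.1 then
            (((PySem.Dict.mk d).get? mots).getD 0, mots)
          else st
        else st)
      ((0 : Int), "")
    = d.foldl (pvStepA k) ((0 : Int), "") := by
  have hkeys : (PySem.Dict.mk d).keys = d.map Prod.fst := by
    simp [PySem.Dict.keys]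
  rw [hkeys, List.foldl_map]
  refine PySem.List.foldl_congr_mem d _ _ _ ?_
  intro acc wc hwc
  have hget : (PySem.Dict.mk d).get? wc.1 = some wc.2 := by
    refine PySem.Dict.get?_of_mem_items (PySem.Dict.mk d) ?_ ?_
    · simpa using hwc
    · simpa [PySem.Dict.keys] using hnd
  simp [pvStepA, hget]

-- A's accumulator stays nonnegative.
theorem pvA_nonneg (k : Int) (l : List (String × Int)) (st : Int × String) (h : 0 ≤ st.1) :
    0 ≤ (l.foldl (pvStepA k) st).1 := by
  induction l generalizing st with
  | nil => exact h
  | cons wc l ih =>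
    simp only [List.foldl_cons]
    refine ih _ ?_
    unfold pvStepA
    split_ifs with h1 h2
    · show (0 : Int) ≤ wc.2; omega
    · exact h
    · exact h

-- The loop invariant: for each length k in 1..28, B's dict holds exactly A's current best for k
-- (present iff the current best count is positive).
theorem pvInv (k : Int) (hk1 : 1 ≤ k) (hk2 : k ≤ 28) (l : List (String × Int))
    (st : Int × String) (b : PySem.Dict Int (String × Int))
    (h : b.get? k = (if 0 < st.1 then some (st.2, st.1) else none)) :
    (l.foldl pvStepB b).get? k
      = (if 0 < (l.foldl (pvStepA k) st).1
          then some ((l.foldl (pvStepA k) st).2, (l.foldl (pvStepA k) st).1) else none) := by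
  induction l generalizing st b with
  | nil => simpa using h
  | cons wc l ih =>
    simp only [List.foldl_cons]
    by_cases hLk : PySem.Str.len wc.1 = k
    · -- the new word has the length under consideration
      have hbv : (b.getD (PySem.Str.len wc.1) ("", 0)).2 = (if 0 < st.1 then st.1 else 0) := by
        rw [PySem.Dict.getD_eq_get?_getD, hLk, h]; split_ifs <;> rfl
      have hstepB : pvStepB b wc
          = (if wc.2 > (if 0 < st.1 then st.1 else 0) then b.insert k (wc.1, wc.2) else b) := by
        unfold pvStepB
        rw [hbv, hLk]
        by_cases hc : wc.2 > (if 0 < st.1 then st.1 else 0)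
        · rw [if_pos ⟨hk1, hk2, hc⟩, if_pos hc]
        · rw [if_neg (by tauto), if_neg hc]
      have hstepA : pvStepA k st wc = (if wc.2 > st.1 then (wc.2, wc.1) else st) := by
        unfold pvStepA; rw [hLk, if_pos rfl]
      rw [hstepB, hstepA]
      by_cases hpos : 0 < st.1
      · rw [if_pos hpos] at hstepB ⊢
        by_cases hc : wc.2 > st.1
        · rw [if_pos hc, if_pos hc]
          exact ih _ _ (by rw [PySem.Dict.get?_insert_self, if_pos (by omega)])
        · rw [if_neg hc, if_neg hc]; exact ih _ _ h
      · rw [if_neg hpos] at hstepB ⊢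
        have hnone : b.get? k = none := by rw [h, if_neg hpos]
        by_cases hc : wc.2 > 0
        · rw [if_pos hc, if_pos (show wc.2 > st.1 by omega)]
          exact ih _ _ (by rw [PySem.Dict.get?_insert_self, if_pos (by omega)])
        · rw [if_neg hc]
          by_cases hc2 : wc.2 > st.1
          · rw [if_pos hc2]
            exact ih _ _ (by rw [hnone, if_neg (by omega)])
          · rw [if_neg hc2]; exact ih _ _ h
    · -- a word of another length never touches key k
      have hstepA : pvStepA k st wc = st := by
        unfold pvStepA; rw [if_neg hLk]
      have hstep : (pvStepB b wc).get? k = b.get? k := by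
        unfold pvStepB
        split_ifs with hg
        · exact PySem.Dict.get?_insert_of_ne b (wc.1, wc.2) (fun hkk => hLk (hkk ▸ rfl))
        · rfl
      rw [hstepA]
      exact ih _ _ (by rw [hstep, h])

-- ===== VERDICT (by name: the statement is the Claim_ definition above) =====
theorem plusFrequentK_spec : Claim_equal_plusFrequentK := by
  intro d _ hnd
  unfold Spec_plusFrequentK plusFrequentK plusFrequentK_alt
  refine congrArg PySem.Dict.items ?_
  refine PySem.List.foldl_congr_mem _ _ _ _ ?_
  intro acc k hkmem
  have hk := (PySem.List.mem_pyRange_one).mp hkmem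
  simp only
  rw [pvInnerA_eq d hnd k]
  have hfoldB : d.foldl
      (fun (best : PySem.Dict Int (String × Int)) wc =>
        let L := PySem.Str.len wc.1
        if 1 ≤ L ∧ L ≤ 28 ∧ wc.2 > (best.getD L ("", 0)).2 then
          best.insert L (wc.1, wc.2)
        else best)
      PySem.Dict.empty = d.foldl pvStepB PySem.Dict.empty := rfl
  rw [hfoldB]
  have hinv := pvInv k hk.1 (by omega) d ((0 : Int), "") PySem.Dict.empty
    (by rw [PySem.Dict.get?_empty]; simp)
  rw [hinv]
  have hnn := pvA_nonneg k d ((0 : Int), "") (by simp)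
  set st := d.foldl (pvStepA k) ((0 : Int), "") with hst
  by_cases hpos : 0 < st.1
  · rw [if_pos hpos, if_pos (by omega)]
  · rw [if_neg hpos, if_neg (by omega)]
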